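-- pv_equiv track=rewrite | github.com/liadraetta/TailNLG-benchmark | Extraction/extracting_triples.py | keep_connected_triples_ids
-- ===== SOURCE A (Python) =====
-- def keep_connected_triples_ids(triples_ids, root_qid):
--     adj = {}
--     for s, _, o in triples_ids:
--         adj.setdefault(s, set()).add(o)
--         adj.setdefault(o, set()).add(s)
--     visited, stack = set(), [root_qid]
--     while stack:
--         node = stack.pop()
--         if node in visited:
--             continue
--         visited.add(node)
--         stack.extend(adj.get(node, []))
--     return [(s, p, o) for (s, p, o) in triples_ids if s in visited and o in visited]
-- ===== SOURCE B (Python) =====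
-- def keep_connected_triples_ids(triples_ids, root_qid):
--     # Fixpoint by bounded passes: each pass merges every edge touching the
--     # visited set; len(triples_ids) passes provably reach the fixed point.
--     visited = {root_qid}
--     for _ in range(len(triples_ids)):
--         for s, _p, o in triples_ids:
--             if s in visited or o in visited:
--                 visited.add(s)
--                 visited.add(o)
--     return [(s, p, o) for (s, p, o) in triples_ids if s in visited and o in visited]
-- ===== Notes on version B (the rewrite author's own statement) =====
-- stated objective: alternative
-- what changed: Replaces the adjacency-dict + explicit DFS stack with a bounded fixed-point iteration: n passes over the triple list, each pass absorbing both endpoints of any edge touching the visited set (n passes provably reach the fixed point), then the same filter.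
import Mathlib
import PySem

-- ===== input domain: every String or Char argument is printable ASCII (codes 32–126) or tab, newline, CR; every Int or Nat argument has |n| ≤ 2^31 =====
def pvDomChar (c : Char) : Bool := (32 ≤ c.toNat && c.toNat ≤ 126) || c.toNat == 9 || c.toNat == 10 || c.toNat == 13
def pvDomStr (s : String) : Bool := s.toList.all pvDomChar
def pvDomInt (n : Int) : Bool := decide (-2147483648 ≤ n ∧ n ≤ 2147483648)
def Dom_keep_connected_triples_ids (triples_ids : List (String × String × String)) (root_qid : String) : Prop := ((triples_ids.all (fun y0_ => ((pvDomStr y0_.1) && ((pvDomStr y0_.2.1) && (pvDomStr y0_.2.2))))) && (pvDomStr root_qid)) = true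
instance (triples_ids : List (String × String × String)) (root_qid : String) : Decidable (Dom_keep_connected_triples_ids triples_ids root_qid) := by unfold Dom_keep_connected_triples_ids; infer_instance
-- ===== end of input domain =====

-- B replaces A's adjacency-dict + explicit DFS stack by a bounded fixed-point iteration over
-- the triple list itself (alternative algorithm, not claimed faster); same return value.

-- ===== PORT A =====
-- the undirected edge relation induced by the triples (used by the termination/invariant
-- arguments the DFS port carries; cited by the port, hence above it)
def pvEdge (triples_ids : List (String × String × String)) (a b : String) : Prop :=
  ∃ t ∈ triples_ids, (t.1 = a ∧ t.2.2 = b) ∨ (t.2.2 = a ∧ t.1 = b)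

-- finite universe of node names (for the DFS termination measure)
def pvNodes (triples_ids : List (String × String × String)) (root_qid : String) : List String :=
  root_qid :: triples_ids.flatMap (fun t => [t.1, t.2.2])

-- adj.setdefault(k, set()).add(v)  ==  adj[k] = adj.get(k, set()) ∪ {v}  ==  Dict.modify k ∅ (·.add v)
def pvBuildAdj (triples_ids : List (String × String × String)) : PySem.Dict String (PySem.Set String) :=
  triples_ids.foldl
    (fun adj t =>
      (adj.modify t.1 PySem.Set.empty (fun S => S.add t.2.2)).modify t.2.2 PySem.Set.empty
        (fun S => S.add t.1))
    PySem.Dict.empty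

theorem pvEdge_cons (t : String × String × String) (l : List (String × String × String))
    (a b : String) :
    pvEdge (t :: l) a b ↔ ((t.1 = a ∧ t.2.2 = b) ∨ (t.2.2 = a ∧ t.1 = b)) ∨ pvEdge l a b := by
  simp [pvEdge, List.mem_cons]

theorem pvBuildAdj_aux (l : List (String × String × String))
    (d : PySem.Dict String (PySem.Set String)) (a b : String) :
    b ∈ (l.foldl
      (fun adj t =>
        (adj.modify t.1 PySem.Set.empty (fun S => S.add t.2.2)).modify t.2.2 PySem.Set.empty
          (fun S => S.add t.1)) d).getD a PySem.Set.empty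
      ↔ b ∈ d.getD a PySem.Set.empty ∨ pvEdge l a b := by
  induction l generalizing d with
  | nil => simp [pvEdge]
  | cons t l ih =>
    rw [List.foldl_cons, ih, pvEdge_cons]
    simp only [PySem.Dict.getD_modify]
    split_ifs <;> simp_all [PySem.Set.mem_add] <;> tauto

theorem pvBuildAdj_mem (triples_ids : List (String × String × String)) (a b : String) :
    b ∈ (pvBuildAdj triples_ids).getD a PySem.Set.empty ↔ pvEdge triples_ids a b := by
  rw [pvBuildAdj, pvBuildAdj_aux]
  simp [PySem.Dict.empty, PySem.Dict.getD, PySem.Dict.get?, PySem.Set.empty]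

theorem pvEdge_mem_nodes (triples_ids : List (String × String × String)) (root_qid : String)
    (a b : String) (h : pvEdge triples_ids a b) : b ∈ pvNodes triples_ids root_qid := by
  obtain ⟨t, ht, h⟩ := h
  rcases h with ⟨-, rfl⟩ | ⟨-, rfl⟩ <;>
    exact List.mem_cons_of_mem _ (List.mem_flatMap.2 ⟨t, ht, by simp⟩)

theorem pvBuildAdj_sub (triples_ids : List (String × String × String)) (root_qid : String) :
    ∀ a b, b ∈ (pvBuildAdj triples_ids).getD a PySem.Set.empty →
      b ∈ pvNodes triples_ids root_qid :=
  fun a b h => pvEdge_mem_nodes _ _ a b ((pvBuildAdj_mem _ a b).1 h)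

theorem pvFilterLen_mono {α : Type} (p q : α → Bool) (hpq : ∀ x, q x = true → p x = true)
    (U : List α) : (U.filter q).length ≤ (U.filter p).length := by
  rw [← List.countP_eq_length_filter, ← List.countP_eq_length_filter]
  exact List.countP_mono_left fun x _ => hpq x

theorem pvFilterLen_lt {α : Type} (p q : α → Bool) (hpq : ∀ x, q x = true → p x = true)
    (a : α) (U : List α) (ha : a ∈ U) (hp : p a = true) (hq : q a = false) :
    (U.filter q).length < (U.filter p).length := by
  induction U with
  | nil => cases ha
  | cons b U ih =>
    rcases List.mem_cons.1 ha with rfl | hb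
    · simp only [List.filter_cons, hp, hq]
      exact Nat.lt_succ_of_le (pvFilterLen_mono p q hpq U)
    · simp only [List.filter_cons]
      by_cases hqb : q b = true
      · simp [hqb, hpq b hqb, ih hb]
      · simp only [Bool.not_eq_true] at hqb
        rw [hqb]
        by_cases hpb : p b = true
        · simp only [hpb, if_true, List.length_cons]
          exact Nat.lt_succ_of_lt (ih hb)
        · simp only [Bool.not_eq_true] at hpb; rw [hpb]; simpa using ih hb

-- the 'while stack' DFS loop of A; the stack is kept top-at-head (Python pops from the END,
-- so a pushed set is appended reversed), which does not change the visited SET the loop builds.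
-- The two Prop arguments only justify termination (visited grows inside the finite universe U).
def pvDfs (adj : PySem.Dict String (PySem.Set String)) (U : List String)
    (visited : PySem.Set String) (stack : List String)
    (hs : ∀ x ∈ stack, x ∈ U)
    (ha : ∀ a b, b ∈ adj.getD a PySem.Set.empty → b ∈ U) : PySem.Set String :=
  match stack with
  | [] => visited
  | node :: rest =>
    if h : visited.contains node then
      pvDfs adj U visited rest (fun x hx => hs x (List.mem_cons_of_mem _ hx)) ha
    else
      pvDfs adj U (visited.add node) ((adj.getD node PySem.Set.empty).reverse ++ rest)
        (fun x hx => by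
          rcases List.mem_append.1 hx with h' | h'
          · exact ha node x (List.mem_reverse.1 h')
          · exact hs x (List.mem_cons_of_mem _ h'))
        ha
termination_by ((U.filter (fun x => !visited.contains x)).length, stack.length)
decreasing_by
  · exact Prod.Lex.right _ (Nat.lt_succ_self _)
  · apply Prod.Lex.left
    apply pvFilterLen_lt (fun x => !visited.contains x)
        (fun x => !(visited.add node).contains x) ?_ node U
        (hs node (List.mem_cons_self)) (by simp only [Bool.not_eq_true] at h; simpa [PySem.Set.contains, List.contains_eq_mem] using h) ?_
    · intro x hx
      simp only [Bool.not_eq_true', PySem.Set.contains, List.contains_eq_mem,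
        decide_eq_false_iff_not] at hx ⊢
      intro hmem
      exact hx ((PySem.Set.mem_add visited node x).2 (Or.inl hmem))
    · simp [PySem.Set.contains, List.contains_eq_mem,
        (PySem.Set.mem_add visited node node).2 (Or.inr rfl)]

def keep_connected_triples_ids (triples_ids : List (String × String × String))
    (root_qid : String) : List (String × String × String) :=
  let adj := pvBuildAdj triples_ids
  let visited := pvDfs adj (pvNodes triples_ids root_qid) PySem.Set.empty [root_qid]
    (fun x hx => by rw [List.mem_singleton] at hx; exact hx ▸ List.mem_cons_self)
    (pvBuildAdj_sub triples_ids root_qid)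
  triples_ids.filter (fun t => visited.contains t.1 && visited.contains t.2.2)

-- ===== PORT B =====
-- one inner 'for s, _p, o in triples_ids' pass of B
def pvPass (triples_ids : List (String × String × String)) (visited : PySem.Set String) :
    PySem.Set String :=
  triples_ids.foldl
    (fun v t => if v.contains t.1 || v.contains t.2.2 then (v.add t.1).add t.2.2 else v)
    visited

def keep_connected_triples_ids_alt (triples_ids : List (String × String × String))
    (root_qid : String) : List (String × String × String) :=
  let visited := (List.range triples_ids.length).foldl
    (fun v _ => pvPass triples_ids v) (PySem.Set.add PySem.Set.empty root_qid)
  triples_ids.filter (fun t => visited.contains t.1 && visited.contains t.2.2)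

-- ===== PRECONDITION & SPEC =====
def Spec_keep_connected_triples_ids (triples_ids : List (String × String × String)) (root_qid : String) (out : List (String × String × String)) : Prop := out = keep_connected_triples_ids_alt triples_ids root_qid
instance (triples_ids : List (String × String × String)) (root_qid : String) (out : List (String × String × String)) : Decidable (Spec_keep_connected_triples_ids triples_ids root_qid out) := by unfold Spec_keep_connected_triples_ids; infer_instance

-- ===== CLAIM (what is proved, stated in full; the proofs are below) =====
def Claim_equal_keep_connected_triples_ids : Prop := ∀ (triples_ids : List (String × String × String)) (root_qid : String), Dom_keep_connected_triples_ids triples_ids root_qid → Spec_keep_connected_triples_ids triples_ids root_qid (keep_connected_triples_ids triples_ids root_qid)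

-- ===== LEMMAS AND PROOFS =====

-- reachability from the root through the undirected triple graph
def pvReach (triples_ids : List (String × String × String)) (root x : String) : Prop :=
  Relation.ReflTransGen (pvEdge triples_ids) root x

theorem pvDfs_mem (triples_ids : List (String × String × String)) (root : String)
    (adj : PySem.Dict String (PySem.Set String)) (U : List String)
    (visited : PySem.Set String) (stack : List String)
    (hs : ∀ x ∈ stack, x ∈ U)
    (ha : ∀ a b, b ∈ adj.getD a PySem.Set.empty → b ∈ U)
    (hadj : ∀ a b, b ∈ adj.getD a PySem.Set.empty ↔ pvEdge triples_ids a b)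
    (hv : ∀ x ∈ visited, pvReach triples_ids root x)
    (hst : ∀ x ∈ stack, pvReach triples_ids root x)
    (hcl : ∀ v ∈ visited, ∀ b, pvEdge triples_ids v b → b ∈ visited ∨ b ∈ stack)
    (hroot : root ∈ visited ∨ root ∈ stack) :
    ∀ x, x ∈ pvDfs adj U visited stack hs ha ↔ pvReach triples_ids root x := by
  revert hv hst hcl hroot
  induction visited, stack, hs using pvDfs.induct adj U ha with
  | case1 visited hs _ =>
    intro hv hst hcl hroot
    -- stack = []
    rw [pvDfs]
    intro x
    constructor
    · exact hv x
    · intro hr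
      induction hr with
      | refl =>
        rcases hroot with h | h
        · exact h
        · cases h
      | tail _ e ih =>
        rename_i y z _
        rcases hcl y ih z e with h | h
        · exact h
        · cases h
  | case2 visited node rest hs h _ ih =>
    intro hv hst hcl hroot
    -- node already visited
    rw [pvDfs]
    simp only [dif_pos h]
    apply ih
    · exact hv
    · exact fun x hx => hst x (List.mem_cons_of_mem _ hx)
    · intro v hvv b e
      rcases hcl v hvv b e with hb | hb
      · exact Or.inl hb
      · rcases List.mem_cons.1 hb with rfl | hb'
        · exact Or.inl (by simpa [PySem.Set.contains, List.contains_eq_mem] using h)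
        · exact Or.inr hb'
    · rcases hroot with hr | hr
      · exact Or.inl hr
      · rcases List.mem_cons.1 hr with rfl | hr'
        · exact Or.inl (by simpa [PySem.Set.contains, List.contains_eq_mem] using h)
        · exact Or.inr hr'
  | case3 visited node rest hs h _ ih =>
    intro hv hst hcl hroot
    -- node newly visited
    have hnode : pvReach triples_ids root node := hst node List.mem_cons_self
    rw [pvDfs]
    simp only [dif_neg h]
    apply ih
    · intro x hx
      rcases (PySem.Set.mem_add _ _ _).1 hx with hx | rfl
      · exact hv x hx
      · exact hnode
    · intro x hx
      rcases List.mem_append.1 hx with hx | hx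
      · exact hnode.tail ((hadj node x).1 (List.mem_reverse.1 hx))
      · exact hst x (List.mem_cons_of_mem _ hx)
    · intro v hvv b e
      rcases (PySem.Set.mem_add _ _ _).1 hvv with hvv | rfl
      · rcases hcl v hvv b e with hb | hb
        · exact Or.inl ((PySem.Set.mem_add _ _ _).2 (Or.inl hb))
        · rcases List.mem_cons.1 hb with rfl | hb'
          · exact Or.inl ((PySem.Set.mem_add _ _ _).2 (Or.inr rfl))
          · exact Or.inr (List.mem_append.2 (Or.inr hb'))
      · exact Or.inr (List.mem_append.2 (Or.inl (List.mem_reverse.2 ((hadj v b).2 e))))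
    · rcases hroot with hr | hr
      · exact Or.inl ((PySem.Set.mem_add _ _ _).2 (Or.inl hr))
      · rcases List.mem_cons.1 hr with rfl | hr'
        · exact Or.inl ((PySem.Set.mem_add _ _ _).2 (Or.inr rfl))
        · exact Or.inr (List.mem_append.2 (Or.inr hr'))

theorem pvA_visited_mem (triples_ids : List (String × String × String)) (root_qid : String) :
    ∀ x, x ∈ pvDfs (pvBuildAdj triples_ids) (pvNodes triples_ids root_qid) PySem.Set.empty
        [root_qid]
        (fun x hx => by rw [List.mem_singleton] at hx; exact hx ▸ List.mem_cons_self)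
        (pvBuildAdj_sub triples_ids root_qid)
      ↔ pvReach triples_ids root_qid x := by
  apply pvDfs_mem
  · exact pvBuildAdj_mem triples_ids
  · intro x hx
    cases hx
  · intro x hx
    rw [List.mem_singleton] at hx
    subst hx
    exact Relation.ReflTransGen.refl
  · intro v hvv
    cases hvv
  · exact Or.inr (List.mem_singleton.2 rfl)

-- ---- B side ----

theorem pvEdge_symm (triples_ids : List (String × String × String)) (a b : String)
    (h : pvEdge triples_ids a b) : pvEdge triples_ids b a := by
  obtain ⟨t, ht, h⟩ := h
  exact ⟨t, ht, h.symm.imp And.symm And.symm⟩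

theorem pvStep_mem (v : PySem.Set String) (t : String × String × String) (y : String)
    (hy : y ∈ v) :
    y ∈ (if v.contains t.1 || v.contains t.2.2 then (v.add t.1).add t.2.2 else v) := by
  split
  · exact (PySem.Set.mem_add _ _ _).2 (Or.inl ((PySem.Set.mem_add _ _ _).2 (Or.inl hy)))
  · exact hy

theorem pvPass_mono (l : List (String × String × String)) (v : PySem.Set String)
    (x : String) (hx : x ∈ v) : x ∈ pvPass l v := by
  induction l generalizing v with
  | nil => exact hx
  | cons t l ih =>
    show x ∈ pvPass l _
    exact ih _ (pvStep_mem v t x hx)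

theorem pvPass_sound (triples_ids l : List (String × String × String)) (root : String)
    (v : PySem.Set String) (hsub : ∀ t ∈ l, t ∈ triples_ids)
    (hv : ∀ x ∈ v, pvReach triples_ids root x) :
    ∀ x ∈ pvPass l v, pvReach triples_ids root x := by
  induction l generalizing v with
  | nil => exact hv
  | cons t l ih =>
    intro x hx
    replace hx : x ∈ pvPass l _ := hx
    refine ih _ (fun t' ht' => hsub t' (List.mem_cons_of_mem _ ht')) ?_ x hx
    intro y hy
    beta_reduce at hy
    by_cases hc : (v.contains t.1 || v.contains t.2.2) = true
    · rw [if_pos hc] at hy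
      have ht : t ∈ triples_ids := hsub t List.mem_cons_self
      have hedge : pvEdge triples_ids t.1 t.2.2 := ⟨t, ht, Or.inl ⟨rfl, rfl⟩⟩
      have h1 : pvReach triples_ids root t.1 ∧ pvReach triples_ids root t.2.2 := by
        have hc' : v.contains t.1 = true ∨ v.contains t.2.2 = true := by simpa using hc
        rcases hc' with h | h
        · have hm : t.1 ∈ v := by simpa [PySem.Set.contains, List.contains_eq_mem] using h
          exact ⟨hv _ hm, (hv _ hm).tail hedge⟩
        · have hm : t.2.2 ∈ v := by simpa [PySem.Set.contains, List.contains_eq_mem] using h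
          exact ⟨(hv _ hm).tail (pvEdge_symm _ _ _ hedge), hv _ hm⟩
      rcases (PySem.Set.mem_add _ _ _).1 hy with hy | rfl
      · rcases (PySem.Set.mem_add _ _ _).1 hy with hy | rfl
        · exact hv _ hy
        · exact h1.1
      · exact h1.2
    · rw [if_neg hc] at hy
      exact hv _ hy

def pvClosed (triples_ids : List (String × String × String)) (v : PySem.Set String) : Prop :=
  ∀ t ∈ triples_ids, (t.1 ∈ v ∨ t.2.2 ∈ v) → (t.1 ∈ v ∧ t.2.2 ∈ v)

theorem pvPass_of_closed (triples_ids l : List (String × String × String))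
    (v : PySem.Set String) (hsub : ∀ t ∈ l, t ∈ triples_ids)
    (hC : pvClosed triples_ids v) : pvPass l v = v := by
  induction l with
  | nil => rfl
  | cons t l ih =>
    show pvPass l _ = v
    beta_reduce
    have hstep : (if v.contains t.1 || v.contains t.2.2 then (v.add t.1).add t.2.2 else v) = v := by
      split
      · rename_i hc
        have hone : t.1 ∈ v ∨ t.2.2 ∈ v := by
          have hc' : v.contains t.1 = true ∨ v.contains t.2.2 = true := by simpa using hc
          rcases hc' with h | h
          · exact Or.inl (by simpa [PySem.Set.contains, List.contains_eq_mem] using h)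
          · exact Or.inr (by simpa [PySem.Set.contains, List.contains_eq_mem] using h)
        have hb := hC t (hsub t List.mem_cons_self) hone
        have e1 : v.add t.1 = v := by
          simp [PySem.Set.add, PySem.Set.contains, List.contains_eq_mem, hb.1]
        rw [e1]
        simp [PySem.Set.add, PySem.Set.contains, List.contains_eq_mem, hb.2]
      · rfl
    rw [hstep]
    exact ih fun t' ht' => hsub t' (List.mem_cons_of_mem _ ht')

theorem pvPass_absorb (l : List (String × String × String)) (v : PySem.Set String)
    (t0 : String × String × String) (ht0 : t0 ∈ l) (h : t0.1 ∈ v ∨ t0.2.2 ∈ v) :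
    t0.1 ∈ pvPass l v ∧ t0.2.2 ∈ pvPass l v := by
  induction l generalizing v with
  | nil => cases ht0
  | cons t l ih =>
    rcases List.mem_cons.1 ht0 with rfl | ht0'
    · have hc : (v.contains t0.1 || v.contains t0.2.2) = true := by
        rcases h with h | h <;> simp [PySem.Set.contains, List.contains_eq_mem, h]
      show t0.1 ∈ pvPass l _ ∧ t0.2.2 ∈ pvPass l _
      beta_reduce
      rw [hc]
      simp only [if_true]
      constructor <;> apply pvPass_mono
      · exact (PySem.Set.mem_add _ _ _).2 (Or.inl ((PySem.Set.mem_add _ _ _).2 (Or.inr rfl)))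
      · exact (PySem.Set.mem_add _ _ _).2 (Or.inr rfl)
    · show t0.1 ∈ pvPass l _ ∧ t0.2.2 ∈ pvPass l _
      exact ih _ ht0' (h.imp (pvStep_mem v t t0.1) (pvStep_mem v t t0.2.2))

theorem pvCnt_lt (triples_ids : List (String × String × String)) (v : PySem.Set String)
    (hnc : ¬ pvClosed triples_ids v) :
    (triples_ids.filter (fun t => v.contains t.1 && v.contains t.2.2)).length <
      (triples_ids.filter (fun t =>
        (pvPass triples_ids v).contains t.1 && (pvPass triples_ids v).contains t.2.2)).length := by
  obtain ⟨t0, ht0, hone, hnboth⟩ :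
      ∃ t ∈ triples_ids, (t.1 ∈ v ∨ t.2.2 ∈ v) ∧ ¬ (t.1 ∈ v ∧ t.2.2 ∈ v) := by
    unfold pvClosed at hnc
    push Not at hnc
    obtain ⟨t, ht, h1, h2⟩ := hnc
    exact ⟨t, ht, h1, fun hb => h2 hb.1 hb.2⟩
  have habs := pvPass_absorb triples_ids v t0 ht0 hone
  refine pvFilterLen_lt _ _ ?_ t0 triples_ids ht0 ?_ ?_
  · intro t ht
    simp only [Bool.and_eq_true, PySem.Set.contains, List.contains_eq_mem,
      decide_eq_true_eq] at ht ⊢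
    exact ⟨pvPass_mono _ _ _ ht.1, pvPass_mono _ _ _ ht.2⟩
  · simp only [Bool.and_eq_true, PySem.Set.contains, List.contains_eq_mem, decide_eq_true_eq]
    exact habs
  · have hn : ¬ (t0.1 ∈ v) ∨ ¬ (t0.2.2 ∈ v) := by tauto
    rcases hn with h | h <;> simp [PySem.Set.contains, List.contains_eq_mem, h]

theorem pvIter_eq (triples_ids : List (String × String × String)) :
    ∀ (n : Nat) (v : PySem.Set String),
      (List.range n).foldl (fun v _ => pvPass triples_ids v) v = (pvPass triples_ids)^[n] v := by
  intro n
  induction n with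
  | zero => intro v; rfl
  | succ n ih =>
    intro v
    rw [List.range_succ, List.foldl_append, ih, Function.iterate_succ_apply']
    rfl

theorem pvIter_closed (triples_ids : List (String × String × String)) :
    ∀ (k : Nat) (v : PySem.Set String),
      triples_ids.length ≤
          (triples_ids.filter (fun t => v.contains t.1 && v.contains t.2.2)).length + k →
        pvClosed triples_ids ((pvPass triples_ids)^[k] v) := by
  intro k
  induction k with
  | zero =>
    intro v hle
    have hle2 := List.length_filter_le (fun t => v.contains t.1 && v.contains t.2.2) triples_ids
    have heq : (triples_ids.filter
        (fun t => v.contains t.1 && v.contains t.2.2)).length = triples_ids.length := by omega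
    have hall := (List.length_filter_eq_length_iff).1 heq
    intro t ht _
    have := hall t ht
    simp only [Bool.and_eq_true, PySem.Set.contains, List.contains_eq_mem,
      decide_eq_true_eq] at this
    exact this
  | succ k ih =>
    intro v hle
    rw [Function.iterate_succ_apply]
    by_cases hC : pvClosed triples_ids v
    · have hfix : pvPass triples_ids v = v := pvPass_of_closed _ _ v (fun _ h => h) hC
      rw [hfix, Function.iterate_fixed hfix]
      exact hC
    · apply ih
      have := pvCnt_lt triples_ids v hC
      omega

theorem pvB_visited_mem (triples_ids : List (String × String × String)) (root_qid : String) :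
    ∀ x, x ∈ (List.range triples_ids.length).foldl (fun v _ => pvPass triples_ids v)
        (PySem.Set.add PySem.Set.empty root_qid)
      ↔ pvReach triples_ids root_qid x := by
  intro x
  rw [pvIter_eq]
  constructor
  · -- soundness through the iterate
    have aux : ∀ (n : Nat) (v : PySem.Set String), (∀ y ∈ v, pvReach triples_ids root_qid y) →
        ∀ y ∈ (pvPass triples_ids)^[n] v, pvReach triples_ids root_qid y := by
      intro n
      induction n with
      | zero => exact fun v hv => hv
      | succ n ih =>
        intro v hv
        rw [Function.iterate_succ_apply]
        exact ih _ (pvPass_sound triples_ids triples_ids root_qid v (fun _ h => h) hv)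
    apply aux
    intro y hy
    rcases (PySem.Set.mem_add _ _ _).1 hy with hy | rfl
    · cases hy
    · exact Relation.ReflTransGen.refl
  · -- completeness: the final set is closed and contains the root
    intro hr
    have hclosed : pvClosed triples_ids
        ((pvPass triples_ids)^[triples_ids.length] (PySem.Set.add PySem.Set.empty root_qid)) :=
      pvIter_closed triples_ids triples_ids.length _ (Nat.le_add_left _ _)
    have hmono : ∀ (n : Nat) (v : PySem.Set String) (y : String), y ∈ v →
        y ∈ (pvPass triples_ids)^[n] v := by
      intro n
      induction n with
      | zero => exact fun v y h => h
      | succ n ih =>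
        intro v y hy
        rw [Function.iterate_succ_apply]
        exact ih _ y (pvPass_mono _ _ _ hy)
    have hroot : root_qid ∈ (pvPass triples_ids)^[triples_ids.length]
        (PySem.Set.add PySem.Set.empty root_qid) :=
      hmono _ _ _ ((PySem.Set.mem_add _ _ _).2 (Or.inr rfl))
    induction hr with
    | refl => exact hroot
    | tail _ e ih =>
      rename_i y z _
      obtain ⟨t, ht, horient⟩ := e
      rcases horient with ⟨h1, h2⟩ | ⟨h1, h2⟩
      · subst h1; subst h2
        exact (hclosed t ht (Or.inl ih)).2
      · subst h1; subst h2
        exact (hclosed t ht (Or.inr ih)).1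

-- ===== VERDICT (by name: the statement is the Claim_ definition above) =====
theorem keep_connected_triples_ids_spec : Claim_equal_keep_connected_triples_ids := by
  intro triples_ids root_qid _
  unfold Spec_keep_connected_triples_ids keep_connected_triples_ids keep_connected_triples_ids_alt
  apply List.filter_congr
  intro t _
  have hA := pvA_visited_mem triples_ids root_qid
  have hB := pvB_visited_mem triples_ids root_qid
  have h1 : ∀ (V W : PySem.Set String), (∀ x, x ∈ V ↔ x ∈ W) →
      ∀ y, V.contains y = W.contains y := by
    intro V W h y
    simp only [PySem.Set.contains, List.contains_eq_mem]
    exact decide_eq_decide.2 (h y)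
  have := h1 _ _ (fun x => (hA x).trans (hB x).symm)
  rw [this t.1, this t.2.2]
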